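-- pv_equiv track=rewrite | github.com/tktcszk/paperdrumer2 | scoreparserex/scoreparserex4.py | adjust
-- ===== SOURCE A (Python) =====
-- def adjust(lst):
--     assert len(lst) > 0, "empty list"
--
--     prev = lst[0]
--     ret = [prev]
--     for i in range(1, len(lst)):
--         curr = lst[i]
--         if curr == "0":
--             ret.append(prev)
--         else:
--             ret.append(curr)
--             prev = curr
--     return ret
-- ===== SOURCE B (Python) =====
-- def adjust(lst):
--     assert len(lst) > 0, "empty list"
--     out = []
--     zc = 0
--     for x in reversed(lst):
--         if x == "0":
--             zc += 1
--         else: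
--             out.extend([x] * (zc + 1))
--             zc = 0
--     out.extend(["0"] * zc)
--     out.reverse()
--     return out
-- ===== Notes on version B (the rewrite author's own statement) =====
-- stated objective: alternative
-- what changed: Traverses the list right-to-left counting zero runs and emits each run at once by replication (reversing the buffer at the end), instead of a left-to-right loop carrying a prev variable per element.
import Mathlib
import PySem

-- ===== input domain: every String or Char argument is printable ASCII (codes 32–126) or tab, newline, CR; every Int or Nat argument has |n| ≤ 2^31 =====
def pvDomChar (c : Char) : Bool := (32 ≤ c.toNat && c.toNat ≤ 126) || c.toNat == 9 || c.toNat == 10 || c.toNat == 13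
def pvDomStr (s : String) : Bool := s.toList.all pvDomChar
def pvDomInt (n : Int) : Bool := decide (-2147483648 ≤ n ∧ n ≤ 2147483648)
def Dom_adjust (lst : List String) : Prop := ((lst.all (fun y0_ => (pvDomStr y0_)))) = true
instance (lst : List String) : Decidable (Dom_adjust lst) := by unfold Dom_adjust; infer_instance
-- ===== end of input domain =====

-- B replaces A's left-to-right prev-carrying loop by a right-to-left pass that counts
-- each run of "0"s and emits it at once by replication, reversing the buffer at the end
-- (same O(n) cost, a genuinely different traversal).

-- ===== PORT A =====
-- forward loop: fold over the tail with state (output so far in reverse, prev)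
def adjust (lst : List String) : List String :=
  match lst with
  | [] => []   -- unreachable: Pre_adjust excludes the empty list (A's assert raises there)
  | h :: t =>
    let st := t.foldl (fun (st : List String × String) curr =>
      if curr == "0" then (st.2 :: st.1, st.2) else (curr :: st.1, curr)) ([h], h)
    st.1.reverse

-- ===== PORT B =====
-- loop body of `for x in reversed(lst)`: count a run of "0"s (zc); on a non-"0" x,
-- extend the buffer with [x] * (zc + 1) and reset zc
def pvStep (st : List String × Nat) (x : String) : List String × Nat :=
  if x == "0" then (st.1, st.2 + 1)
  else (st.1 ++ List.replicate (st.2 + 1) x, 0)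

def adjust_alt (lst : List String) : List String :=
  -- assert len(lst) > 0 is excluded via Pre_adjust (B raises there too)
  let st := lst.reverse.foldl pvStep ([], 0)
  (st.1 ++ List.replicate st.2 "0").reverse

-- ===== PRECONDITION & SPEC =====
-- A (and B) raise AssertionError on the empty list; Pre_ excludes exactly that input.
def Pre_adjust (lst : List String) : Prop := lst ≠ []
instance (lst : List String) : Decidable (Pre_adjust lst) := by unfold Pre_adjust; infer_instance
def pvWitness_adjust : List String := ["1", "0", "2"]

def Spec_adjust (lst : List String) (out : List String) : Prop := out = adjust_alt lst
instance (lst : List String) (out : List String) : Decidable (Spec_adjust lst out) := by unfold Spec_adjust; infer_instance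

-- ===== CLAIM (what is proved, stated in full; the proofs are below) =====
def Claim_equal_adjust : Prop := ∀ (lst : List String), Dom_adjust lst → Pre_adjust lst → Spec_adjust lst (adjust lst)

-- ===== LEMMAS AND PROOFS =====
-- the common specification: forward fill carrying prev
def pvFill : String → List String → List String
  | _, [] => []
  | prev, x :: xs => let v := if x == "0" then prev else x; v :: pvFill v xs

-- A's loop computes pvFill
theorem foldl_fill (t : List String) (prev : String) (ret : List String) :
    (t.foldl (fun (st : List String × String) curr =>
      if curr == "0" then (st.2 :: st.1, st.2) else (curr :: st.1, curr)) (ret, prev)).1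
    = (pvFill prev t).reverse ++ ret := by
  induction t generalizing prev ret with
  | nil => simp [pvFill]
  | cons x xs ih =>
    simp only [List.foldl_cons, pvFill]
    by_cases h : x == "0"
    · rw [if_pos h, if_pos h, ih]; simp
    · rw [if_neg h, if_neg h, ih]; simp

-- reversing a buffer extended by a replicated run
theorem rev_app_rep (o : List String) (z : Nat) (p : String) :
    (o ++ List.replicate (z + 1) p).reverse = p :: (o ++ List.replicate z p).reverse := by
  rw [List.reverse_append, List.reverse_replicate, List.replicate_succ, List.cons_append,
     List.reverse_append, List.reverse_replicate]

-- B's backward pass: the pending zero run takes any value plugged in afterwards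
theorem foldr_fill (lst : List String) (p : String) :
    (((lst.foldr (fun x st => pvStep st x) ([], 0)).1
      ++ List.replicate (lst.foldr (fun x st => pvStep st x) ([], 0)).2 p).reverse)
    = pvFill p lst := by
  induction lst generalizing p with
  | nil => simp [pvFill]
  | cons x xs ih =>
    simp only [List.foldr_cons, pvFill]
    by_cases h : x == "0"
    · rw [show (pvStep (xs.foldr (fun x st => pvStep st x) ([], 0)) x)
            = ((xs.foldr (fun x st => pvStep st x) ([], 0)).1,
               (xs.foldr (fun x st => pvStep st x) ([], 0)).2 + 1) from by
            simp [pvStep, h]]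
      rw [if_pos h, rev_app_rep, ih]
    · rw [show (pvStep (xs.foldr (fun x st => pvStep st x) ([], 0)) x)
            = ((xs.foldr (fun x st => pvStep st x) ([], 0)).1
                ++ List.replicate ((xs.foldr (fun x st => pvStep st x) ([], 0)).2 + 1) x, 0) from by
            simp [pvStep, h]]
      rw [if_neg h]
      simp only [List.replicate_zero, List.append_nil]
      rw [rev_app_rep, ih]

-- the first element equals the fill seeded with "0" (v₀ = h in both cases)
theorem fill_zero_cons (h : String) (t : List String) :
    pvFill "0" (h :: t) = h :: pvFill h t := by
  by_cases hz : h == "0"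
  · have : h = "0" := by simpa using hz
    simp [pvFill, this]
  · simp [pvFill, hz]

-- ===== VERDICT (by name: the statement is the Claim_ definition above) =====
theorem adjust_spec : Claim_equal_adjust := by
  intro lst _ hpre
  match lst with
  | [] => exact absurd rfl hpre
  | h :: t =>
    show adjust (h :: t) = adjust_alt (h :: t)
    simp only [adjust, adjust_alt, List.foldl_reverse]
    rw [foldl_fill t h [h], foldr_fill (h :: t) "0", fill_zero_cons]
    simp
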